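-- pv_equiv track=rewrite | github.com/yii41/google-step | week1/hw-1.py | solution
-- ===== SOURCE A (Python) =====
-- def solution(random_word, dictionary):
--
--     # sorted random word & dictionary
--     sorted_random_word = ''.join(sorted(random_word))
--     sorted_new_dictionary = sorted((''.join(sorted(word.strip())), word.strip()) for word in dictionary)
--
--     # binary search
--     left, right = 0, len(sorted_new_dictionary) - 1
--
--     while left <= right:
--         mid = (left + right) // 2
--         mid_word = sorted_new_dictionary[mid][0]
--
--         if mid_word == sorted_random_word:
--             return sorted_new_dictionary[mid][1]
--         elif mid_word < sorted_random_word: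
--             left = mid + 1
--         else:
--             right = mid - 1
-- ===== SOURCE B (Python) =====
-- def solution(random_word, dictionary):
--     target = sorted(random_word)
--     for word in dictionary:
--         w = word.strip()
--         if sorted(w) == target:
--             return w
-- ===== Notes on version B (the rewrite author's own statement) =====
-- stated objective: faster
-- what changed: B replaces A's sort of the whole (sorted-key, word) dictionary plus binary search by a single linear scan returning the first anagram match; Pre_ excludes inputs where several distinct words match, on which A's binary search lands on an accidental one of the tied entries.
-- outside the precondition, e.g. on solution('ab', ['ab', 'ba', 'x']): A returns 'ba', B returns 'ab'
import Mathlib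
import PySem

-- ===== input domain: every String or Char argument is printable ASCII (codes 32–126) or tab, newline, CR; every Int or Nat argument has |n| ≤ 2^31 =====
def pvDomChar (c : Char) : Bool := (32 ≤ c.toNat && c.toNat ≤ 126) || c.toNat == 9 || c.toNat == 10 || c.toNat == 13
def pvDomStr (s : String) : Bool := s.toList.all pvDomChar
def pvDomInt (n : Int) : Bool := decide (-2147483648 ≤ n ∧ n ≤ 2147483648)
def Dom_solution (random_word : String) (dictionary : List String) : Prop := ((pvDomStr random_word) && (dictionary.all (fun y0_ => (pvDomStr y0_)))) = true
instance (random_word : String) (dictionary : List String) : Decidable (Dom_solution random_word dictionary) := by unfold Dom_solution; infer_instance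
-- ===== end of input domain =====

-- B replaces A's sort-the-whole-dictionary + binary search by a single linear scan returning
-- the first anagram match (objective: faster, by skipping the global sort).

-- ===== PORT A =====
-- ''.join(sorted(...)) on a word's characters / Python's sort of the (key, word) tuples
def sortChars (cs : List Char) : List Char := PySem.List.sorted cs id
def lexKey (p : List Char × List Char) : Lex (List Char × List Char) := toLex p

-- the (sorted-key, stripped-word) pair A's generator builds for each dictionary word
def wordPair (w : String) : List Char × List Char :=
  (sortChars (PySem.Str.strip w).toList, (PySem.Str.strip w).toList)

-- A's `while left <= right` binary search; the fuel argument (arr.length at the call, an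
-- upper bound on the iteration count) only makes the recursion structural; the `none` arm of
-- the match is Python's (here unreachable for in-range indices) IndexError path of
-- `sorted_new_dictionary[mid]`.
def aLoop (target : List Char) (arr : List (List Char × List Char)) :
    Nat → Int → Int → Option String
  | 0, _, _ => none
  | fuel + 1, left, right =>
    if left ≤ right then
      match PySem.List.pyGet? arr (PySem.Int.floordiv (left + right) 2) with
      | none => none
      | some p =>
        if p.1 = target then some (String.ofList p.2)
        else if p.1 < target then aLoop target arr fuel (PySem.Int.floordiv (left + right) 2 + 1) right
        else aLoop target arr fuel left (PySem.Int.floordiv (left + right) 2 - 1)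
    else none

def solution (random_word : String) (dictionary : List String) : Option String :=
  let target := sortChars random_word.toList
  let arr := PySem.List.sorted (dictionary.map wordPair) lexKey
  aLoop target arr arr.length 0 ((arr.length : Int) - 1)

-- ===== PORT B =====
-- B's `for word in dictionary: ... return w` loop
def bFind (target : List Char) : List String → Option String
  | [] => none
  | w :: ws =>
    let s := (PySem.Str.strip w).toList
    if sortChars s = target then some (String.ofList s) else bFind target ws

def solution_alt (random_word : String) (dictionary : List String) : Option String :=
  bFind (sortChars random_word.toList) dictionary

-- ===== PRECONDITION & SPEC =====
-- Pre_ excludes inputs on which several DISTINCT (stripped) dictionary words are anagrams of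
-- random_word: there A's binary search lands on an accidental one of the tied sorted entries,
-- a tie-break no one would specify, while B naturally returns the first match.
def Pre_solution (random_word : String) (dictionary : List String) : Prop :=
  ((dictionary.map (fun w => (PySem.Str.strip w).toList)).filter
      (fun s => sortChars s == sortChars random_word.toList)).Pairwise (· = ·)
instance (random_word : String) (dictionary : List String) : Decidable (Pre_solution random_word dictionary) := by unfold Pre_solution; infer_instance

def pvWitness_solution : String × List String := ("ab", ["ba", "x"])

def Spec_solution (random_word : String) (dictionary : List String) (out : Option String) : Prop := out = solution_alt random_word dictionary
instance (random_word : String) (dictionary : List String) (out : Option String) : Decidable (Spec_solution random_word dictionary out) := by unfold Spec_solution; infer_instance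

-- ===== CLAIM (what is proved, stated in full; the proofs are below) =====
def Claim_equal_solution : Prop := ∀ (random_word : String) (dictionary : List String), Dom_solution random_word dictionary → Pre_solution random_word dictionary → Spec_solution random_word dictionary (solution random_word dictionary)

-- ===== LEMMAS AND PROOFS =====

def sortWords (ws : List (List Char)) : List (List Char) := PySem.List.sorted ws id

lemma sortWords_perm (xs : List (List Char)) : (sortWords xs).Perm xs :=
  PySem.List.sorted_perm xs id false

lemma sortWords_pairwise (xs : List (List Char)) : (sortWords xs).Pairwise (· ≤ ·) := by
  unfold sortWords
  convert @PySem.List.sorted_pairwise (List Char) (List Char) (@List.instLinearOrder Char _) xs id using 2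

lemma lex_pairwise (L : List (List Char × List Char)) :
    (PySem.List.sorted L lexKey).Pairwise (fun a b => toLex a ≤ toLex b) := by
  convert @PySem.List.sorted_pairwise _ _
    (inferInstance : LinearOrder (Lex (List Char × List Char))) L lexKey using 2

lemma mem_sorted_filter {p : List Char × List Char → Bool} {L : List (List Char × List Char)}
    {x : List Char × List Char}
    (hx : x ∈ PySem.List.sorted (L.filter p) lexKey) : p x = true := by
  have := (PySem.List.sorted_perm (L.filter p) lexKey false).mem_iff.mp hx
  exact List.of_mem_filter this

-- A's sorted dictionary decomposes as (below target) ++ (target block) ++ (above target).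
lemma sorted_decomp (t : List Char) (L : List (List Char × List Char)) :
    PySem.List.sorted L lexKey
      = PySem.List.sorted (L.filter (fun p => decide (p.1 < t))) lexKey
        ++ (sortWords ((L.filter (fun p => p.1 == t)).map (·.2))).map (fun w => (t, w))
        ++ PySem.List.sorted (L.filter (fun p => decide (t < p.1))) lexKey := by
  set A1 := PySem.List.sorted (L.filter (fun p => decide (p.1 < t))) lexKey with hA1
  set M := (sortWords ((L.filter (fun p => p.1 == t)).map (·.2))).map
             (fun w => ((t : List Char), w)) with hM
  set A2 := PySem.List.sorted (L.filter (fun p => decide (t < p.1))) lexKey with hA2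
  have hmemA1 : ∀ x ∈ A1, x.1 < t := fun x hx => by
    simpa using mem_sorted_filter (p := fun p => decide (p.1 < t)) hx
  have hmemA2 : ∀ x ∈ A2, t < x.1 := fun x hx => by
    simpa using mem_sorted_filter (p := fun p => decide (t < p.1)) hx
  have hmemM : ∀ x ∈ M, x.1 = t := by
    intro x hx
    rw [hM] at hx
    obtain ⟨w, _, rfl⟩ := List.mem_map.mp hx
    rfl
  -- the concatenation is a permutation of L
  have hperm : (A1 ++ M ++ A2).Perm L := by
    have h1 : A1.Perm (L.filter (fun p => decide (p.1 < t))) :=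
      PySem.List.sorted_perm _ _ false
    have h2 : A2.Perm (L.filter (fun p => decide (t < p.1))) :=
      PySem.List.sorted_perm _ _ false
    have hMeq : ((L.filter (fun p => p.1 == t)).map (·.2)).map
        (fun w => ((t : List Char), w)) = L.filter (fun p => p.1 == t) := by
      rw [List.map_map]
      have : ∀ x ∈ L.filter (fun p => p.1 == t),
          ((fun w => ((t : List Char), w)) ∘ (·.2)) x = id x := by
        intro x hx
        have := List.of_mem_filter hx
        have hxt : x.1 = t := by simpa using this
        simp [Function.comp, ← hxt]
      rw [List.map_congr_left this, List.map_id]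
    have h3 : M.Perm (L.filter (fun p => p.1 == t)) := by
      rw [hM]
      have hp := (sortWords_perm ((L.filter (fun p => p.1 == t)).map (·.2))).map
        (fun w => ((t : List Char), w))
      rw [hMeq] at hp
      exact hp
    have hsplit1 := List.filter_append_perm (fun p => decide (p.1 < t)) L
    have hsplit2 := List.filter_append_perm (fun p => p.1 == t)
      (L.filter (fun x => !decide (x.1 < t)))
    have hfe : (L.filter (fun x => !decide (x.1 < t))).filter (fun p => p.1 == t)
        = L.filter (fun p => p.1 == t) := by
      rw [List.filter_filter]
      apply List.filter_congr
      intro a _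
      by_cases h : a.1 = t
      · simp [h]
      · simp [h]
    have hfg : (L.filter (fun x => !decide (x.1 < t))).filter (fun p => !(p.1 == t))
        = L.filter (fun p => decide (t < p.1)) := by
      rw [List.filter_filter]
      apply List.filter_congr
      intro a _
      rcases lt_trichotomy a.1 t with h | h | h
      · simp [h, ne_of_lt h, not_lt_of_gt h]
      · simp [h]
      · simp [h, (ne_of_gt h), not_lt_of_gt h]
    have hstep1 : (A1 ++ M ++ A2).Perm
        (L.filter (fun p => decide (p.1 < t)) ++ (L.filter (fun p => p.1 == t)
          ++ L.filter (fun p => decide (t < p.1)))) := by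
      rw [List.append_assoc]
      exact h1.append (h3.append h2)
    refine hstep1.trans ?_
    refine (List.Perm.append_left _ ?_).trans hsplit1
    rw [← hfe, ← hfg]
    exact hsplit2
  -- both sides are sorted
  have hsortL : (PySem.List.sorted L lexKey).Pairwise
      (fun a b => toLex a ≤ toLex b) := lex_pairwise L
  have hsortR : (A1 ++ M ++ A2).Pairwise (fun a b => toLex a ≤ toLex b) := by
    rw [List.pairwise_append]
    refine ⟨?_, ?_, ?_⟩
    · rw [List.pairwise_append]
      refine ⟨lex_pairwise _, ?_, ?_⟩
      · rw [hM]
        refine List.Pairwise.map _ ?_ (sortWords_pairwise ((L.filter (fun p => p.1 == t)).map (·.2)))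
        intro a b hab
        rw [Prod.Lex.le_iff]
        exact Or.inr ⟨rfl, hab⟩
      · intro a ha b hb
        rw [Prod.Lex.le_iff]
        exact Or.inl (lt_of_lt_of_eq (hmemA1 a ha) (hmemM b hb).symm)
    · exact lex_pairwise _
    · intro a ha b hb
      rw [Prod.Lex.le_iff]
      rcases List.mem_append.mp ha with h | h
      · exact Or.inl (lt_trans (hmemA1 a h) (hmemA2 b hb))
      · exact Or.inl (lt_of_eq_of_lt (hmemM a h) (hmemA2 b hb))
  have hperm2 : (PySem.List.sorted L lexKey).Perm (A1 ++ M ++ A2) :=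
    (PySem.List.sorted_perm L _ false).trans hperm.symm
  exact List.eq_of_perm_of_sorted
    (fun a b _ _ hab hba => toLex.injective (le_antisymm hab hba)) hsortL hsortR hperm2

-- when no key equals the target, A's binary search returns none
lemma aLoop_none (t : List Char) (arr : List (List Char × List Char))
    (h : ∀ p ∈ arr, p.1 ≠ t) :
    ∀ (fuel : Nat) (left right : Int), aLoop t arr fuel left right = none := by
  intro fuel
  induction fuel with
  | zero => intro left right; rfl
  | succ m ih =>
    intro left right
    rw [aLoop]
    by_cases hlr : left ≤ right
    · rw [if_pos hlr]
      set mid := PySem.Int.floordiv (left + right) 2 with hmid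
      cases hg : PySem.List.pyGet? arr mid with
      | none => rfl
      | some p =>
        have hp := h p (PySem.List.mem_of_pyGet?_eq_some _ hg)
        dsimp only
        rw [if_neg hp]
        by_cases hlt : p.1 < t
        · rw [if_pos hlt]
          exact ih (mid + 1) right
        · rw [if_neg hlt]
          exact ih left (mid - 1)
    · rw [if_neg hlr]

-- when the target block is nonempty and all its words are w0, A's binary search returns w0
lemma aLoop_found (t : List Char) (A1 A2 : List (List Char × List Char))
    (block : List (List Char)) (w0 : List Char)
    (h1 : ∀ p ∈ A1, p.1 < t) (h3 : ∀ p ∈ A2, t < p.1)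
    (hall : ∀ b ∈ block, b = w0) (hne : block ≠ []) :
    ∀ (fuel : Nat) (left right : Int), (right + 1 - left).toNat ≤ fuel →
      0 ≤ left → left ≤ (A1.length : Int) →
      (A1.length : Int) + block.length - 1 ≤ right →
      right ≤ ((A1.length : Int) + block.length + A2.length) - 1 →
      aLoop t (A1 ++ block.map (fun w => (t, w)) ++ A2) fuel left right
        = some (String.ofList w0) := by
  set arr := A1 ++ block.map (fun w => ((t : List Char), w)) ++ A2 with harr
  have hbpos : 0 < block.length := List.length_pos_iff.mpr hne
  intro fuel
  induction fuel with
  | zero =>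
    intro left right hm h0 hla hrb hrn
    omega
  | succ m ih =>
    intro left right hm h0 hla hrb hrn
    have hlr : left ≤ right := by omega
    rw [aLoop, if_pos hlr]
    have hb := PySem.Int.floordiv_two_mid_bounds hlr
    set mid := PySem.Int.floordiv (left + right) 2 with hmid
    have hmid0 : 0 ≤ mid := le_trans h0 hb.1
    set j := mid.toNat with hj
    have hjmid : (j : Int) = mid := Int.toNat_of_nonneg hmid0
    have hget : PySem.List.pyGet? arr mid = arr[j]? := by
      rw [← hjmid, PySem.List.pyGet?_natCast]
    rcases Nat.lt_or_ge j A1.length with hc | hc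
    · -- mid indexes A1: key < t, move right
      have hval : arr[j]? = some (A1[j]'hc) := by
        rw [harr, List.getElem?_append_left (by simp; omega),
          List.getElem?_append_left hc, List.getElem?_eq_getElem hc]
      have hpl : (A1[j]'hc).1 < t := h1 _ (A1.getElem_mem hc)
      rw [hget, hval]
      simp only [ne_of_lt hpl, if_false, hpl, if_true]
      exact ih (mid + 1) right (by omega) (by omega) (by omega) hrb hrn
    · rcases Nat.lt_or_ge (j - A1.length) block.length with hin | hout
      · -- mid inside the block: return its word, which is w0
        have hbw : block[j - A1.length]'hin = w0 := hall _ (block.getElem_mem hin)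
        have hval : arr[j]? = some (t, w0) := by
          rw [harr, List.getElem?_append_left (by simp; omega),
            List.getElem?_append_right hc, List.getElem?_map,
            List.getElem?_eq_getElem hin, hbw]
          rfl
        rw [hget, hval]
        simp
      · -- mid above the block: key > t, move left
        have hj2 : (A1 ++ block.map (fun w => ((t : List Char), w))).length ≤ j := by
          simp only [List.length_append, List.length_map]
          omega
        have hlt2 : j - (A1 ++ block.map (fun w => ((t : List Char), w))).length
            < A2.length := by
          simp only [List.length_append, List.length_map]
          omega
        have hval : arr[j]?
            = some (A2[j - (A1 ++ block.map (fun w => ((t : List Char), w))).length]'hlt2) := by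
          rw [harr, List.getElem?_append_right hj2, List.getElem?_eq_getElem hlt2]
        have hpg : t < (A2[j - (A1 ++ block.map (fun w => ((t : List Char), w))).length]'hlt2).1 :=
          h3 _ (A2.getElem_mem hlt2)
        have hmidge : (A1.length : Int) + block.length ≤ mid := by
          simp only [List.length_append, List.length_map] at hj2
          omega
        rw [hget, hval]
        simp only [ne_of_gt hpg, if_false, not_lt_of_gt hpg]
        exact ih left (mid - 1) (by omega) h0 hla (by omega) (by omega)

-- B's loop returns the first stripped word whose sorted characters equal the target
lemma bFind_spec (t : List Char) (dict : List String) :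
    bFind t dict = Option.map String.ofList
      (((dict.map (fun w => (PySem.Str.strip w).toList)).filter
          (fun s => sortChars s == t)).head?) := by
  induction dict with
  | nil => rfl
  | cons w ws ih =>
    rw [bFind]
    simp only [List.map_cons, List.filter_cons, PySem.Str.toList_strip] at ih ⊢
    by_cases h : sortChars (PySem.Chars.strip w.toList) = t
    · simp [h]
    · simp [h, ih]

-- the match block of A's sorted dictionary carries exactly B's matches (as words)
lemma match_words (t : List Char) (dict : List String) :
    ((dict.map wordPair).filter (fun p => p.1 == t)).map (·.2)
      = (dict.map (fun w => (PySem.Str.strip w).toList)).filter (fun s => sortChars s == t) := by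
  induction dict with
  | nil => rfl
  | cons w ws ih =>
    simp only [List.map_cons, List.filter_cons]
    by_cases h : sortChars (PySem.Str.strip w).toList = t
    · simp only [wordPair, h, beq_self_eq_true, if_true, List.map_cons, ih]
    · simp only [wordPair, beq_iff_eq, h, if_false, ih]

-- ===== VERDICT (by name: the statement is the Claim_ definition above) =====
theorem solution_spec : Claim_equal_solution := by
  intro rw dict _dom hpre
  unfold Pre_solution at hpre
  unfold Spec_solution solution solution_alt
  dsimp only
  set t := sortChars rw.toList with ht
  set L := dict.map wordPair with hL
  set M := (dict.map (fun w => (PySem.Str.strip w).toList)).filter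
      (fun s => sortChars s == t) with hM
  have hMeq : (L.filter (fun p => p.1 == t)).map (·.2) = M := match_words t dict
  have hdec := sorted_decomp t L
  set A1 := PySem.List.sorted (L.filter (fun p => decide (p.1 < t))) lexKey with hA1
  set A2 := PySem.List.sorted (L.filter (fun p => decide (t < p.1))) lexKey with hA2
  have h1 : ∀ p ∈ A1, p.1 < t := fun x hx => by
    simpa using mem_sorted_filter (p := fun p => decide (p.1 < t)) hx
  have h3 : ∀ p ∈ A2, t < p.1 := fun x hx => by
    simpa using mem_sorted_filter (p := fun p => decide (t < p.1)) hx
  rw [bFind_spec t dict, ← hM]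
  rw [hMeq] at hdec
  cases hMc : M with
  | nil =>
    rw [hMc] at hdec
    simp only [sortWords, PySem.List.sorted] at hdec
    have hdec' : PySem.List.sorted L lexKey = A1 ++ A2 := by
      simpa using hdec
    rw [hdec']
    have hno : ∀ p ∈ A1 ++ A2, p.1 ≠ t := by
      intro p hp
      rcases List.mem_append.mp hp with h | h
      · exact ne_of_lt (h1 p h)
      · exact ne_of_gt (h3 p h)
    rw [aLoop_none t (A1 ++ A2) hno]
    simp
  | cons w0 rest =>
    -- Pre_: all matches equal, so every word of the block is w0
    rw [hMc] at hpre
    have hallM : ∀ b ∈ M, b = w0 := by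
      rw [hMc]
      intro b hb
      rcases List.mem_cons.mp hb with h | h
      · exact h
      · exact ((List.pairwise_cons.mp hpre).1 b h).symm
    set block := sortWords M with hblock
    have hpermB : block.Perm M := sortWords_perm M
    have hallB : ∀ b ∈ block, b = w0 := fun b hb => hallM b (hpermB.mem_iff.mp hb)
    have hneB : block ≠ [] := by
      intro h
      have := hpermB.length_eq
      rw [h, hMc] at this
      simp at this
    rw [hdec]
    have hlen : ((A1 ++ block.map (fun w => (t, w)) ++ A2).length : Int)
        = (A1.length : Int) + block.length + A2.length := by
      simp only [List.length_append, List.length_map]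
      push_cast
      ring
    rw [hlen]
    have hbpos : 0 < block.length := List.length_pos_iff.mpr hneB
    rw [aLoop_found t A1 A2 block w0 h1 h3 hallB hneB
      (A1 ++ block.map (fun w => (t, w)) ++ A2).length 0
      ((A1.length : Int) + block.length + A2.length - 1)
      (by simp only [List.length_append, List.length_map]; omega)
      le_rfl (by positivity) (by omega) le_rfl]
    have hhead : (w0 :: rest).head? = some w0 := rfl
    rw [hhead]
    rfl
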